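-- pv_equiv track=rewrite | github.com/Hik289/high-frequency-trading-system | 新建文件夹/backup/factor_search_min.py | get_daily_min
-- ===== SOURCE A (Python) =====
-- def get_daily_min(date: int):
--     min_lst = list()
--     min_lst += list(range(901, 960))
--     min_lst += list(range(1000, 1016))
--     min_lst += list(range(1031, 1060))
--     min_lst += list(range(1100, 1131))
--     min_lst += list(range(1331, 1360))
--     min_lst += list(range(1400, 1460))
--     min_lst += [1500]
--
--     res_lst = [elem + date * 10000 for elem in min_lst]
--     return res_lst
-- ===== SOURCE B (Python) =====
-- def get_daily_min(date: int):
--     sessions = [(901, 1015), (1031, 1130), (1331, 1459), (1500, 1500)]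
--     res_lst = []
--     base = date * 10000
--     for start, end in sessions:
--         h, m = divmod(start, 100)
--         while True:
--             res_lst.append(h * 100 + m + base)
--             if h * 100 + m == end:
--                 break
--             m += 1
--             if m == 60:
--                 h += 1
--                 m = 0
--     return res_lst
-- ===== Notes on version B (the rewrite author's own statement) =====
-- stated objective: alternative
-- what changed: B replaces A's literal concatenation of hard-coded HHMM ranges by a clock walk over session boundary pairs: for each session it steps from the start time minute by minute, rolling the minute counter over into the hour, and emits each HHMM stamp offset by the date prefix.
import Mathlib
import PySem

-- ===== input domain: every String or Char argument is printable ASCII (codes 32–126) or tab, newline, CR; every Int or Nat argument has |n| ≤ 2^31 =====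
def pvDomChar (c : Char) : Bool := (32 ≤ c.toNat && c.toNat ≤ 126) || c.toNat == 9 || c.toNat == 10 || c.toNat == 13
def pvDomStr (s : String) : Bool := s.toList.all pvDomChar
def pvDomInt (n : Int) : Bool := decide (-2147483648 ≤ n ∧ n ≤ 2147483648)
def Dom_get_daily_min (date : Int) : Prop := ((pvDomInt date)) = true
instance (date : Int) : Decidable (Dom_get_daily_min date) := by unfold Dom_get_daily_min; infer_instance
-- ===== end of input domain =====

-- B rebuilds the same minute list by walking a clock through session boundary pairs
-- instead of concatenating literal ranges (objective: alternative decomposition).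

-- ===== PORT A =====
def get_daily_min (date : Int) : List Int :=
  let min_lst : List Int := []
  let min_lst := min_lst ++ PySem.List.pyRange 901 960 1
  let min_lst := min_lst ++ PySem.List.pyRange 1000 1016 1
  let min_lst := min_lst ++ PySem.List.pyRange 1031 1060 1
  let min_lst := min_lst ++ PySem.List.pyRange 1100 1131 1
  let min_lst := min_lst ++ PySem.List.pyRange 1331 1360 1
  let min_lst := min_lst ++ PySem.List.pyRange 1400 1460 1
  let min_lst := min_lst ++ [(1500 : Int)]
  min_lst.map (fun elem => elem + date * 10000)

-- ===== PORT B =====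
-- the `while True` loop of Source B, with fuel (200 > any session length) making it total
def pvWalk (fuel : Nat) (h m endv base : Int) : List Int :=
  match fuel with
  | 0 => []
  | fuel + 1 =>
    (h * 100 + m + base) ::
      (if h * 100 + m == endv then []
       else if m + 1 == 60 then pvWalk fuel (h + 1) 0 endv base
       else pvWalk fuel h (m + 1) endv base)

def get_daily_min_alt (date : Int) : List Int :=
  let sessions : List (Int × Int) := [(901, 1015), (1031, 1130), (1331, 1459), (1500, 1500)]
  let base := date * 10000
  sessions.foldl
    (fun res se =>
      res ++ pvWalk 200 (PySem.Int.floordiv se.1 100) (PySem.Int.mod se.1 100) se.2 base)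
    []

-- ===== PRECONDITION & SPEC =====
def Spec_get_daily_min (date : Int) (out : List Int) : Prop := out = get_daily_min_alt date
instance (date : Int) (out : List Int) : Decidable (Spec_get_daily_min date out) := by unfold Spec_get_daily_min; infer_instance

-- ===== CLAIM (what is proved, stated in full; the proofs are below) =====
def Claim_equal_get_daily_min : Prop := ∀ (date : Int), Dom_get_daily_min date → Spec_get_daily_min date (get_daily_min date)

-- ===== LEMMAS AND PROOFS =====

-- the times-only version of pvWalk (base factored out)
def pvWalkT (fuel : Nat) (h m endv : Int) : List Int :=
  match fuel with
  | 0 => []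
  | fuel + 1 =>
    (h * 100 + m) ::
      (if h * 100 + m == endv then []
       else if m + 1 == 60 then pvWalkT fuel (h + 1) 0 endv
       else pvWalkT fuel h (m + 1) endv)

theorem pvWalk_eq_map (fuel : Nat) (h m endv base : Int) :
    pvWalk fuel h m endv base = (pvWalkT fuel h m endv).map (fun t => t + base) := by
  induction fuel generalizing h m with
  | zero => rfl
  | succ fuel ih =>
    simp only [pvWalk, pvWalkT, List.map_cons]
    split_ifs <;> simp [ih]

theorem get_daily_min_alt_eq_map (date : Int) :
    get_daily_min_alt date =
      (pvWalkT 200 9 1 1015 ++ pvWalkT 200 10 31 1130 ++ pvWalkT 200 13 31 1459 ++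
        pvWalkT 200 15 0 1500).map (fun t => t + date * 10000) := by
  simp only [get_daily_min_alt, List.foldl, pvWalk_eq_map, List.map_append, List.nil_append,
    show PySem.Int.floordiv 901 100 = 9 from by decide, show PySem.Int.mod 901 100 = 1 from by decide,
    show PySem.Int.floordiv 1031 100 = 10 from by decide, show PySem.Int.mod 1031 100 = 31 from by decide,
    show PySem.Int.floordiv 1331 100 = 13 from by decide, show PySem.Int.mod 1331 100 = 31 from by decide,
    show PySem.Int.floordiv 1500 100 = 15 from by decide, show PySem.Int.mod 1500 100 = 0 from by decide]

-- ===== VERDICT (by name: the statement is the Claim_ definition above) =====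
set_option maxRecDepth 8000 in
set_option maxHeartbeats 1000000 in
theorem get_daily_min_spec : Claim_equal_get_daily_min := by
  intro date _
  unfold Spec_get_daily_min
  rw [get_daily_min_alt_eq_map]
  unfold get_daily_min
  congr 1
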